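-- pv_equiv track=rewrite | github.com/mahatmadanu/hackerrank | Problem Solving/Implementation/Beautiful Days at the Movies.py | beautifulDays
-- ===== SOURCE A (Python) =====
-- def beautifulDays(i, j, k):
--     # Complete this function
--     number = []
--     reversedNumber = []
--     beautiful = 0
--     while i <= j:
--         strNumber = str(i)
--         tempReversedStrNumber = ""
--         for c in reversed(strNumber):
--             tempReversedStrNumber = tempReversedStrNumber+c
--         tempReversedIntNumber = int(tempReversedStrNumber)
--         number.append(i)
--         reversedNumber.append(tempReversedIntNumber)
--         i += 1
--     l = 0
--     while l < len(number):
--         mod = number[l]-reversedNumber[l]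
--         if mod % k == 0:
--             beautiful+= 1
--         l += 1
--     return beautiful
-- ===== SOURCE B (Python) =====
-- def beautifulDays(i, j, k):
--     beautiful = 0
--     for n in range(i, j + 1):
--         if (n - int(str(n)[::-1])) % k == 0:
--             beautiful += 1
--     return beautiful
-- ===== Notes on version B (the rewrite author's own statement) =====
-- stated objective: simpler
-- what changed: Replaces A's two while-loops and two parallel lists (build number/reversedNumber tables, then index-scan them) with a single for-loop over range(i, j+1) that computes the reverse via str(n)[::-1] instead of char-by-char string concatenation and maintains only the counter.
import Mathlib
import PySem

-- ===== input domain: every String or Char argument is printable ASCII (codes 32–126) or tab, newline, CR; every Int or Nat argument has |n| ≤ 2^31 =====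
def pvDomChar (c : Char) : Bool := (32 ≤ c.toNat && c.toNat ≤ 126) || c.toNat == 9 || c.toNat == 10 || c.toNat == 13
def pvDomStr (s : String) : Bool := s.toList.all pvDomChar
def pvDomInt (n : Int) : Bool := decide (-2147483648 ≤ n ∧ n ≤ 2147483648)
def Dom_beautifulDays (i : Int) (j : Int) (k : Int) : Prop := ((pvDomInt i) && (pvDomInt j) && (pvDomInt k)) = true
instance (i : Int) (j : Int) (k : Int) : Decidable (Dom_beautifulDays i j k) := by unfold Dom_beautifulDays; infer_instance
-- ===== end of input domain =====

-- B replaces A's two while-loops and two parallel lists with one streaming pass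
-- keeping only the counter (objective: simpler).

-- ===== PORT A =====
-- str(i) reversed character by character, then int(...); Python raises ValueError when
-- the reversed string is not an int literal (negative i) — those inputs are outside Pre_,
-- the port returns getD 0 there.
def pvRevA (n : Int) : Int :=
  (PySem.Int.ofStr? (String.mk
    (((PySem.Int.toStr n).toList.reverse).foldl (fun acc c => acc ++ [c]) []))).getD 0

-- first while-loop: builds (number, reversedNumber); fuel = number of remaining iterations
def pvBuildA : Nat → Int → List Int × List Int
  | 0, _ => ([], [])
  | f + 1, n =>
      let rest := pvBuildA f (n + 1)
      (n :: rest.1, pvRevA n :: rest.2)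

-- second while-loop: index scan over the two parallel lists accumulating `beautiful`
def pvScanA (k : Int) : List Int → List Int → Int → Int
  | n :: ns, r :: rs, beautiful =>
      pvScanA k ns rs (if PySem.Int.mod (n - r) k = 0 then beautiful + 1 else beautiful)
  | _, _, beautiful => beautiful

def beautifulDays (i : Int) (j : Int) (k : Int) : Int :=
  let lists := pvBuildA (j - i + 1).toNat i
  pvScanA k lists.1 lists.2 0

-- ===== PORT B =====
-- int(str(n)[::-1])  (same raising behaviour as A; getD 0 outside Pre_)
def pvRevB (n : Int) : Int :=
  (PySem.Int.ofStr? (String.mk ((PySem.Int.toStr n).toList.reverse))).getD 0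

def beautifulDays_alt (i : Int) (j : Int) (k : Int) : Int :=
  (PySem.List.pyRange i (j + 1) 1).foldl
    (fun beautiful n =>
      if PySem.Int.mod (n - pvRevB n) k = 0 then beautiful + 1 else beautiful) 0

-- ===== PRECONDITION & SPEC =====
-- Pre_ excludes exactly the inputs where Python A raises: k = 0 with a nonempty range
-- (ZeroDivisionError) and negative i with a nonempty range (ValueError on int("…-")).
def Pre_beautifulDays (i : Int) (j : Int) (k : Int) : Prop := j < i ∨ (0 ≤ i ∧ k ≠ 0)
instance (i : Int) (j : Int) (k : Int) : Decidable (Pre_beautifulDays i j k) := by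
  unfold Pre_beautifulDays; infer_instance

def pvWitness_beautifulDays : Int × Int × Int := (20, 23, 6)

def Spec_beautifulDays (i : Int) (j : Int) (k : Int) (out : Int) : Prop := out = beautifulDays_alt i j k
instance (i : Int) (j : Int) (k : Int) (out : Int) : Decidable (Spec_beautifulDays i j k out) := by
  unfold Spec_beautifulDays; infer_instance

-- ===== CLAIM (what is proved, stated in full; the proofs are below) =====
def Claim_equal_beautifulDays : Prop := ∀ (i : Int) (j : Int) (k : Int), Dom_beautifulDays i j k → Pre_beautifulDays i j k → Spec_beautifulDays i j k (beautifulDays i j k)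

-- ===== LEMMAS AND PROOFS =====

lemma pv_foldl_append_singleton (l acc : List Char) :
    l.foldl (fun a c => a ++ [c]) acc = acc ++ l := by
  induction l generalizing acc with
  | nil => simp
  | cons c t ih => simp [List.foldl, ih]

lemma pvRevA_eq_pvRevB (n : Int) : pvRevA n = pvRevB n := by
  unfold pvRevA pvRevB
  rw [pv_foldl_append_singleton]
  simp

lemma pv_main (k : Int) : ∀ (f : Nat) (i b : Int), (b + 1 - i).toNat = f →
    pvScanA k (pvBuildA f i).1 (pvBuildA f i).2 0 + 0 =
      (PySem.List.pyRange i (b + 1) 1).foldl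
        (fun beautiful n =>
          if PySem.Int.mod (n - pvRevB n) k = 0 then beautiful + 1 else beautiful) 0 := by
  -- generalize the accumulator first
  suffices h : ∀ (f : Nat) (i b acc : Int), (b + 1 - i).toNat = f →
      pvScanA k (pvBuildA f i).1 (pvBuildA f i).2 acc =
        (PySem.List.pyRange i (b + 1) 1).foldl
          (fun beautiful n =>
            if PySem.Int.mod (n - pvRevB n) k = 0 then beautiful + 1 else beautiful) acc by
    intro f i b hf
    simpa using h f i b 0 hf
  intro f
  induction f with
  | zero =>
      intro i b acc hf
      have : b + 1 ≤ i := by omega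
      rw [PySem.List.pyRange_one_eq_nil this]
      simp [pvBuildA, pvScanA]
  | succ f ih =>
      intro i b acc hf
      have hlt : i < b + 1 := by omega
      rw [PySem.List.pyRange_one_cons hlt]
      simp only [pvBuildA, pvScanA, List.foldl, pvRevA_eq_pvRevB]
      exact ih (i + 1) b _ (by omega)

-- ===== VERDICT (by name: the statement is the Claim_ definition above) =====
theorem beautifulDays_spec : Claim_equal_beautifulDays := by
  intro i j k _ _
  unfold Spec_beautifulDays beautifulDays beautifulDays_alt
  simpa using pv_main k (j - i + 1).toNat i j (by omega)
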